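-- pv_equiv track=rewrite | github.com/calebgetahun/question-solutions | CodeForces/Contests/Round 1017 (Div. 4)/bobritto_bandito.py | infected
-- ===== SOURCE A (Python) =====
-- def infected(n, m, l, r):
--     if m == n:
--         return f"{l} {r}"
--
--     left, right = 0, 0
--     for i in range(m):
--         if left <= l:
--             right += 1
--         elif right >= r:
--             right += 1
--         else:
--             left -= 1
--
--     return f"{left} {right}"
-- ===== SOURCE B (Python) =====
-- def infected(n, m, l, r):
--     if m == n:
--         return f"{l} {r}"
--     steps = max(m, 0)
--     if l >= 0 or r <= 0:
--         return f"0 {steps}"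
--     k = min(steps, -l)
--     return f"{-k} {steps - k}"
-- ===== Notes on version B (the rewrite author's own statement) =====
-- stated objective: faster
-- what changed: Replaced the m-iteration simulation loop with O(1) closed-form arithmetic: left decreases to at most l (while r > 0), and all remaining steps increment right.
import Mathlib
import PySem

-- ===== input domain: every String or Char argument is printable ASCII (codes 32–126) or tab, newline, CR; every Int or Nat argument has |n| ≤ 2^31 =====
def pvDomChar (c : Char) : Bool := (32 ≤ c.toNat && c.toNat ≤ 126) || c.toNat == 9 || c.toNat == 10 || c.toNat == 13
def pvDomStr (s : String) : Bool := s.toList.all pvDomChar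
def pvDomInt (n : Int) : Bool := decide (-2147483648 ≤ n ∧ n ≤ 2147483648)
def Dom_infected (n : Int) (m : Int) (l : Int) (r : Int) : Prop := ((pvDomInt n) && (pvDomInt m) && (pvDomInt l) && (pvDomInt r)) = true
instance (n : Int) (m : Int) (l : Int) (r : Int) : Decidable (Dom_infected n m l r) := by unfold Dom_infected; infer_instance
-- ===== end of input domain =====

-- B replaces A's m-step simulation with O(1) closed-form arithmetic (left drops to l, remaining steps extend right).

-- ===== PORT A =====
def infected (n : Int) (m : Int) (l : Int) (r : Int) : String :=
  if m == n then PySem.Int.toStr l ++ " " ++ PySem.Int.toStr r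
  else
    let p := (PySem.List.pyRange 0 m 1).foldl
      (fun (st : Int × Int) _ =>
        if st.1 ≤ l then (st.1, st.2 + 1)
        else if st.2 ≥ r then (st.1, st.2 + 1)
        else (st.1 - 1, st.2)) (0, 0)
    PySem.Int.toStr p.1 ++ " " ++ PySem.Int.toStr p.2

-- ===== PORT B =====
def infected_alt (n : Int) (m : Int) (l : Int) (r : Int) : String :=
  if m == n then PySem.Int.toStr l ++ " " ++ PySem.Int.toStr r
  else
    let steps := max m 0
    if 0 ≤ l ∨ r ≤ 0 then "0 " ++ PySem.Int.toStr steps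
    else
      let k := min steps (-l)
      PySem.Int.toStr (-k) ++ " " ++ PySem.Int.toStr (steps - k)

-- ===== PRECONDITION & SPEC =====
def Spec_infected (n : Int) (m : Int) (l : Int) (r : Int) (out : String) : Prop := out = infected_alt n m l r
instance (n : Int) (m : Int) (l : Int) (r : Int) (out : String) : Decidable (Spec_infected n m l r out) := by unfold Spec_infected; infer_instance

-- ===== CLAIM (what is proved, stated in full; the proofs are below) =====
def Claim_equal_infected : Prop := ∀ (n : Int) (m : Int) (l : Int) (r : Int), Dom_infected n m l r → Spec_infected n m l r (infected n m l r)

-- ===== LEMMAS AND PROOFS =====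

-- A's loop body (ignores the loop index)
def pvStep (l r : Int) (st : Int × Int) : Int × Int :=
  if st.1 ≤ l then (st.1, st.2 + 1)
  else if st.2 ≥ r then (st.1, st.2 + 1)
  else (st.1 - 1, st.2)

lemma pvFold_eq_iterate (l r : Int) (xs : List Int) (s : Int × Int) :
    xs.foldl (fun (st : Int × Int) _ =>
        if st.1 ≤ l then (st.1, st.2 + 1)
        else if st.2 ≥ r then (st.1, st.2 + 1)
        else (st.1 - 1, st.2)) s = (pvStep l r)^[xs.length] s := by
  induction xs generalizing s with
  | nil => rfl
  | cons x xs ih =>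
      simp only [List.foldl_cons, List.length_cons, Function.iterate_succ_apply]
      exact ih _

lemma pvIterate_char (l r : Int) (k : ℕ) :
    (pvStep l r)^[k] (0, 0) =
      if 0 ≤ l ∨ r ≤ 0 then ((0 : Int), (k : Int))
      else (-(min (k : Int) (-l)), (k : Int) - min (k : Int) (-l)) := by
  induction k with
  | zero =>
      split_ifs with h
      · simp
      · simp
        omega
  | succ k ih =>
      rw [Function.iterate_succ_apply', ih]
      by_cases h : 0 ≤ l ∨ r ≤ 0
      · simp only [if_pos h, pvStep]
        split_ifs with h1 h2 <;> push_cast <;>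
          first
          | rfl
          | (exfalso; omega)
      · simp only [if_neg h, pvStep]
        push Not at h
        split_ifs with h1 h2 <;> refine Prod.ext ?_ ?_ <;> push_cast <;> simp at * <;> omega

theorem infected_spec : Claim_equal_infected := by
  intro n m l r _
  unfold Spec_infected infected infected_alt
  by_cases hmn : m == n
  · simp [hmn]
  · simp only [hmn, Bool.false_eq_true, if_false]
    rw [pvFold_eq_iterate, PySem.List.length_pyRange_one, pvIterate_char]
    have hlen : (((m - 0).toNat : Int)) = max m 0 := by omega
    by_cases h : 0 ≤ l ∨ r ≤ 0
    · simp only [if_pos h, hlen]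
      rfl
    · simp only [if_neg h, hlen]

-- ===== VERDICT (by name: the statement is the Claim_ definition above) =====
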